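-- pv_equiv track=rewrite | github.com/Imwisagist/Leetcode_algorithm_tasks | yandex_algotraining_homework/2.Lecture/G.Наибольшее произведение двух чисел.py | solve
-- ===== SOURCE A (Python) =====
-- def solve(nums):
--     m1p = max(nums[0], nums[1])
--     m2p = min(nums[0], nums[1])
--     m1n, m2n = m2p, m1p
--
--     for num in nums[2:]:
--         if num > m2p:
--             if num > m1p: m1p, m2p = num, m1p
--             else: m2p = num
--
--         elif num < m2n:
--             if num < m1n: m1n, m2n = num, m1n
--             else: m2n = num
--
--     return (m2p, m1p) if m1p * m2p >= m1n * m2n else (m1n, m2n)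
-- ===== SOURCE B (Python) =====
-- def solve(nums):
--     s = sorted(nums)
--     big = (s[-2], s[-1])
--     small = (s[0], s[1])
--     hi = big[0] * big[1]
--     lo = small[0] * small[1]
--     return big if hi >= lo else small
-- ===== Notes on version B (the rewrite author's own statement) =====
-- stated objective: simpler
-- what changed: Replaces A's one-pass four-extremum state machine by sorting a copy and comparing the two candidate products taken from the ends of the sorted list, which also fixes A's missed second-minimum.
-- intended difference: When the third element lies strictly between the first two and every later element is strictly larger than it, A's elif never records it as the second minimum, so when the two smallest numbers have the larger product A returns a pair with a wrong (too large) second component, while B returns the true two smallest numbers (s[0], s[1]), the intended maximal-product pair. — e.g. on solve([-9, 10, -8]): A returns (-8, 10), B returns (-9, -8)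
import Mathlib
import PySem

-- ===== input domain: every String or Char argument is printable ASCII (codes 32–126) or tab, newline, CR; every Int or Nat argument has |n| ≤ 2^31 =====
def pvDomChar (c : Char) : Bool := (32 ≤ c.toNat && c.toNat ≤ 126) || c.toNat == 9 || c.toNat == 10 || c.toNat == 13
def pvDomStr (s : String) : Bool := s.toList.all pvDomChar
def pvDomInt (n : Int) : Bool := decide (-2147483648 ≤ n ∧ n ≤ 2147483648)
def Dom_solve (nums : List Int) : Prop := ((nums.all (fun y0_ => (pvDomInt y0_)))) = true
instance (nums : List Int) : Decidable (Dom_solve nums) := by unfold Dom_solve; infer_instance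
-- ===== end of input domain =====

-- B replaces A's one-pass four-extremum tracker by sorting a copy (never mutating the argument)
-- and comparing the two end products; on the D_solve inputs below it fixes A's missed second minimum.

-- ===== PORT A =====
-- the loop body of A, state (m1n, m2n, m2p, m1p)
def solveStep (st : Int × Int × Int × Int) (num : Int) : Int × Int × Int × Int :=
  let (m1n, m2n, m2p, m1p) := st
  if num > m2p then
    if num > m1p then (m1n, m2n, m1p, num) else (m1n, m2n, num, m1p)
  else if num < m2n then
    if num < m1n then (num, m1n, m2p, m1p) else (m1n, num, m2p, m1p)
  else (m1n, m2n, m2p, m1p)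

def solve (nums : List Int) : Int × Int :=
  match PySem.List.pyGet? nums 0, PySem.List.pyGet? nums 1 with
  | some x0, some x1 =>
    -- m1p = max(nums[0],nums[1]); m2p = min(...); m1n, m2n = m2p, m1p
    let st := (PySem.List.slice nums (some 2) none).foldl solveStep
                (min x0 x1, max x0 x1, min x0 x1, max x0 x1)
    if st.2.2.2 * st.2.2.1 ≥ st.1 * st.2.1 then (st.2.2.1, st.2.2.2) else (st.1, st.2.1)
  | _, _ => (0, 0)  -- IndexError on nums[0]/nums[1]: outside Pre_solve

-- ===== PORT B =====
def solve_alt (nums : List Int) : Int × Int :=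
  let s := PySem.List.sorted nums (fun x => x) false
  (((PySem.List.pyGet? s (-2)).bind fun sm2 =>
    (PySem.List.pyGet? s (-1)).bind fun sm1 =>
    (PySem.List.pyGet? s 0).bind fun s0 =>
    (PySem.List.pyGet? s 1).map fun s1 =>
      let big := (sm2, sm1)
      let small := (s0, s1)
      let hi := big.1 * big.2
      let lo := small.1 * small.2
      if hi ≥ lo then big else small).getD (0, 0))  -- IndexError (len < 2): outside Pre_solve

-- ===== PRECONDITION & SPEC =====
-- A evaluates nums[1] (and B s[-2]) unconditionally: both raise IndexError iff len(nums) < 2.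
def Pre_solve (nums : List Int) : Prop := 2 ≤ nums.length
instance (nums : List Int) : Decidable (Pre_solve nums) := by unfold Pre_solve; infer_instance
def pvWitness_solve : List Int := ([3, 1, 4])

-- When nums[2] lies strictly between nums[0] and nums[1] and every later element is strictly
-- larger than nums[2], A's elif never records nums[2] as the second minimum, so when the two
-- smallest numbers' product beats the two largest numbers' product A returns a pair whose second
-- component is too large, while B returns the true maximal-product pair (s[0], s[1]).
def D_solve (nums : List Int) : Prop :=
  match nums with
  | a :: b :: c :: r =>
    let v := nums.foldr max c
    min a b < c ∧ c < r.foldr min (max a b) ∧ (nums.erase v).foldr max c * v < min a b * c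
  | _ => False
instance (nums : List Int) : Decidable (D_solve nums) := by
  unfold D_solve
  rcases nums with _ | ⟨a, _ | ⟨b, _ | ⟨c, r⟩⟩⟩ <;> infer_instance

def Spec_solve (nums : List Int) (out : Int × Int) : Prop := ¬ D_solve nums → out = solve_alt nums
instance (nums : List Int) (out : Int × Int) : Decidable (Spec_solve nums out) := by
  unfold Spec_solve; infer_instance

def pvDiffWitness_solve : List Int := ([-9, 10, -8])
def pvDiffWitnessOut_solve : (Int × Int) × (Int × Int) := ((-8, 10), (-9, -8))

-- ===== CLAIM (what is proved, stated in full; the proofs are below) =====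
def Claim_unchanged_solve : Prop :=
  ∀ (nums : List Int), Dom_solve nums → Pre_solve nums → Spec_solve nums (solve nums)
def Claim_changed_solve : Prop :=
  Dom_solve (pvDiffWitness_solve) ∧ Pre_solve (pvDiffWitness_solve) ∧ D_solve (pvDiffWitness_solve) ∧
  solve (pvDiffWitness_solve) = pvDiffWitnessOut_solve.1 ∧
  solve_alt (pvDiffWitness_solve) = pvDiffWitnessOut_solve.2 ∧
  pvDiffWitnessOut_solve.1 ≠ pvDiffWitnessOut_solve.2
def Claim_exact_solve : Prop :=
  ∀ (nums : List Int), Dom_solve nums → Pre_solve nums → D_solve nums → solve nums ≠ solve_alt nums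

-- ===== LEMMAS AND PROOFS =====

def PvMax (l : List Int) (m : Int) : Prop := m ∈ l ∧ ∀ x ∈ l, x ≤ m
def PvMin (l : List Int) (m : Int) : Prop := m ∈ l ∧ ∀ x ∈ l, m ≤ x

theorem pvMax_eq {l : List Int} {m m' : Int} (h : PvMax l m) (h' : PvMax l m') : m = m' :=
  le_antisymm (h'.2 m h.1) (h.2 m' h'.1)

theorem pvMin_eq {l : List Int} {m m' : Int} (h : PvMin l m) (h' : PvMin l m') : m = m' :=
  le_antisymm (h.2 m' h'.1) (h'.2 m h.1)

theorem pvMax_perm {l l' : List Int} {m : Int} (hp : l.Perm l') (h : PvMax l m) : PvMax l' m :=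
  ⟨hp.mem_iff.mp h.1, fun x hx => h.2 x (hp.mem_iff.mpr hx)⟩

theorem pvMin_perm {l l' : List Int} {m : Int} (hp : l.Perm l') (h : PvMin l m) : PvMin l' m :=
  ⟨hp.mem_iff.mp h.1, fun x hx => h.2 x (hp.mem_iff.mpr hx)⟩

theorem le_foldr_max (l : List Int) (d : Int) : ∀ x ∈ l, x ≤ l.foldr max d := by
  induction l with
  | nil => intro x hx; simp at hx
  | cons y ys ih =>
      intro x hx
      rcases List.mem_cons.mp hx with h | h
      · rw [h]; exact le_max_left y _
      · exact le_trans (ih x h) (le_max_right y _)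

theorem foldr_max_mem (l : List Int) (d : Int) : l.foldr max d = d ∨ l.foldr max d ∈ l := by
  induction l with
  | nil => exact Or.inl rfl
  | cons y ys ih =>
      rcases max_choice y (ys.foldr max d) with h | h
      · right; rw [List.foldr_cons, h]; simp
      · rcases ih with h' | h'
        · left; rw [List.foldr_cons, h, h']
        · right; rw [List.foldr_cons, h]; exact List.mem_cons.mpr (Or.inr h')

theorem foldr_max_pvMax (l : List Int) (d : Int) (hd : d ∈ l) : PvMax l (l.foldr max d) := by
  refine ⟨?_, le_foldr_max l d⟩
  rcases foldr_max_mem l d with h | h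
  · rw [h]; exact hd
  · exact h

theorem foldr_min_lt_iff (r : List Int) (c M : Int) :
    c < r.foldr min M ↔ (c < M ∧ ∀ x ∈ r, c < x) := by
  induction r with
  | nil => simp
  | cons y ys ih =>
      rw [List.foldr_cons, lt_min_iff, ih]
      constructor
      · rintro ⟨h1, h2, h3⟩
        refine ⟨h2, ?_⟩
        intro x hx
        rcases List.mem_cons.mp hx with h | h
        · omega
        · exact h3 x h
      · rintro ⟨h1, h2⟩
        exact ⟨h2 y (by simp), h1, fun x hx => h2 x (by simp [hx])⟩

-- the loop invariant: state (m1n, m2n, m2p, m1p) after A has processed a :: b :: rho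
def LoopInv (a b : Int) (rho : List Int) (st : Int × Int × Int × Int) : Prop :=
  PvMax (a :: b :: rho) st.2.2.2 ∧
  PvMax ((a :: b :: rho).erase st.2.2.2) st.2.2.1 ∧
  PvMin (a :: b :: rho) st.1 ∧
  (PvMin ((a :: b :: rho).erase st.1) st.2.1 ∨
   ∃ c rest, rho = c :: rest ∧ min a b < c ∧ c < max a b ∧ (∀ x ∈ rest, c < x) ∧
     c < st.2.1 ∧ st.2.1 ∈ (a :: b :: rho) ∧ c ≤ st.2.2.1)

theorem erase_min_two (a b : Int) : ([a, b] : List Int).erase (min a b) = [max a b] := by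
  rcases le_total a b with h | h <;> rcases eq_or_ne a b with he | hne <;>
    simp_all [List.erase_cons, min_eq_left, min_eq_right, max_eq_left, max_eq_right]

theorem erase_max_two (a b : Int) : ([a, b] : List Int).erase (max a b) = [min a b] := by
  rcases le_total a b with h | h <;> rcases eq_or_ne a b with he | hne <;>
    simp_all [List.erase_cons, min_eq_left, min_eq_right, max_eq_left, max_eq_right]

theorem loopInv_init (a b : Int) : LoopInv a b [] (min a b, max a b, min a b, max a b) := by
  refine ⟨⟨?_, ?_⟩, ?_, ⟨?_, ?_⟩, Or.inl ?_⟩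
  · rcases le_total a b with h | h <;> simp [max_eq_left, max_eq_right, h]
  · intro x hx; rcases List.mem_cons.mp hx with h | h <;> simp_all
  · rw [show ((min a b, max a b, min a b, max a b) : Int × Int × Int × Int).2.2.2 = max a b from rfl,
        erase_max_two]
    exact ⟨List.mem_singleton.mpr rfl, by intro x hx; simp_all⟩
  · rcases le_total a b with h | h <;> simp [min_eq_left, min_eq_right, h]
  · intro x hx; rcases List.mem_cons.mp hx with h | h <;> simp_all
  · rw [show ((min a b, max a b, min a b, max a b) : Int × Int × Int × Int).1 = min a b from rfl,
        erase_min_two]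
    exact ⟨List.mem_singleton.mpr rfl, by intro x hx; simp_all⟩

theorem maxab_pvMax (a b : Int) : PvMax [a, b] (max a b) := by
  refine ⟨?_, ?_⟩
  · rcases le_total a b with h | h <;> simp [max_eq_left, max_eq_right, h]
  · intro x hx; rcases List.mem_cons.mp hx with h | h <;> simp_all

theorem minab_pvMin (a b : Int) : PvMin [a, b] (min a b) := by
  refine ⟨?_, ?_⟩
  · rcases le_total a b with h | h <;> simp [min_eq_left, min_eq_right, h]
  · intro x hx; rcases List.mem_cons.mp hx with h | h <;> simp_all

theorem erase_min_cons (a b : Int) (tl : List Int) :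
    (a :: b :: tl).erase (min a b) = max a b :: tl := by
  rcases le_total a b with h | h <;> rcases eq_or_ne a b with he | hne <;>
    simp_all [List.erase_cons, min_eq_left, min_eq_right, max_eq_left, max_eq_right]

-- with at least three elements, the tracked second minimum never exceeds the second maximum
theorem m2n_le_m2p (L : List Int) (hlen : 3 ≤ L.length)
    {m1n m2n m2p m1p : Int}
    (h1 : PvMax L m1p) (h2 : PvMax (L.erase m1p) m2p)
    (h3 : PvMin L m1n) (hb : PvMin (L.erase m1n) m2n) : m2n ≤ m2p := by
  by_cases he : m2n = m1p
  · -- every element of L.erase m1n equals m1p, so m1p occurs twice in L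
    have hall : ∀ y ∈ L.erase m1n, y = m1p := by
      intro y hy
      have h1y := h1.2 y (List.mem_of_mem_erase hy)
      have h2y := hb.2 y hy
      omega
    have hlenE : (L.erase m1n).length = L.length - 1 := List.length_erase_of_mem h3.1
    have hcountE : (L.erase m1n).count m1p = (L.erase m1n).length := by
      rw [List.count_eq_length]
      intro y hy; exact (hall y hy).symm
    have hsub : (L.erase m1n).count m1p ≤ L.count m1p := by
      have hs : (L.erase m1n).Sublist L := List.erase_sublist
      exact hs.count_le m1p
    have hcountL : 2 ≤ L.count m1p := by omega
    have hmem : m1p ∈ L.erase m1p := by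
      have hce : (L.erase m1p).count m1p = L.count m1p - 1 := List.count_erase_self
      have : 0 < (L.erase m1p).count m1p := by omega
      exact List.count_pos_iff.mp this
    have := h2.2 m1p hmem
    omega
  · exact h2.2 m2n ((List.mem_erase_of_ne he).mpr (List.mem_of_mem_erase hb.1))

theorem loopInv_step (a b x : Int) (rho : List Int) (st : Int × Int × Int × Int)
    (h : LoopInv a b rho st) : LoopInv a b (rho ++ [x]) (solveStep st x) := by
  obtain ⟨m1n, m2n, m2p, m1p⟩ := st
  obtain ⟨h1, h2, h3, h4⟩ := h
  dsimp only at h1 h2 h3 h4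
  have hL : (a :: b :: (rho ++ [x])) = (a :: b :: rho) ++ [x] := rfl
  have hm2pm1p : m2p ≤ m1p := h1.2 _ (List.mem_of_mem_erase h2.1)
  have hm1nm2p : m1n ≤ m2p := h3.2 _ (List.mem_of_mem_erase h2.1)
  have hm1nm2n : m1n ≤ m2n := by
    rcases h4 with hb | ⟨c, rest, hrho, hc1, hc2, hc3, hc4, hc5, hc6⟩
    · exact h3.2 _ (List.mem_of_mem_erase hb.1)
    · exact h3.2 _ hc5
  by_cases hx1 : x > m2p
  · by_cases hx2 : x > m1p
    · -- new state (m1n, m2n, m1p, x)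
      have hstep : solveStep (m1n, m2n, m2p, m1p) x = (m1n, m2n, m1p, x) := by
        simp [solveStep, hx1, hx2]
      rw [hstep]
      have hxnot : x ∉ (a :: b :: rho) := fun hm => absurd (h1.2 x hm) (not_le.mpr hx2)
      unfold LoopInv; dsimp only
      rw [hL]
      refine ⟨⟨?_, ?_⟩, ?_, ⟨?_, ?_⟩, ?_⟩
      · exact List.mem_append.mpr (Or.inr (by simp))
      · intro y hy
        rcases List.mem_append.mp hy with hm | hm
        · exact le_of_lt (lt_of_le_of_lt (h1.2 y hm) hx2)
        · simp at hm; omega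
      · rw [List.erase_append_right _ hxnot]
        simpa using h1
      · exact List.mem_append.mpr (Or.inl h3.1)
      · intro y hy
        rcases List.mem_append.mp hy with hm | hm
        · exact h3.2 y hm
        · simp at hm; omega
      · rcases h4 with hb | ⟨c, rest, hrho, hc1, hc2, hc3, hc4, hc5, hc6⟩
        · left
          rw [List.erase_append_left _ h3.1]
          refine ⟨List.mem_append.mpr (Or.inl hb.1), ?_⟩
          intro y hy
          rcases List.mem_append.mp hy with hm | hm
          · exact hb.2 y hm
          · simp at hm
            have := h3.2 _ (List.mem_of_mem_erase hb.1)
            have hle := h1.2 m2n (List.mem_of_mem_erase hb.1)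
            omega
        · right
          refine ⟨c, rest ++ [x], by simp [hrho], hc1, hc2, ?_, hc4, List.mem_append.mpr (Or.inl hc5), by omega⟩
          intro y hy
          rcases List.mem_append.mp hy with hm | hm
          · exact hc3 y hm
          · simp at hm; omega
    · -- new state (m1n, m2n, x, m1p)
      have hstep : solveStep (m1n, m2n, m2p, m1p) x = (m1n, m2n, x, m1p) := by
        simp [solveStep, hx1, hx2]
      rw [hstep]
      unfold LoopInv; dsimp only
      rw [hL]
      have hxm1p : x ≤ m1p := not_lt.mp hx2
      refine ⟨⟨List.mem_append.mpr (Or.inl h1.1), ?_⟩, ⟨?_, ?_⟩, ⟨List.mem_append.mpr (Or.inl h3.1), ?_⟩, ?_⟩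
      · intro y hy
        rcases List.mem_append.mp hy with hm | hm
        · exact h1.2 y hm
        · simp at hm; omega
      · rw [List.erase_append_left _ h1.1]
        exact List.mem_append.mpr (Or.inr (by simp))
      · rw [List.erase_append_left _ h1.1]
        intro y hy
        rcases List.mem_append.mp hy with hm | hm
        · exact le_of_lt (lt_of_le_of_lt (h2.2 y hm) hx1)
        · simp at hm; omega
      · intro y hy
        rcases List.mem_append.mp hy with hm | hm
        · exact h3.2 y hm
        · simp at hm; omega
      · rcases h4 with hb | ⟨c, rest, hrho, hc1, hc2, hc3, hc4, hc5, hc6⟩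
        · by_cases hxm2n : x < m2n
          · -- the miss: enter the degenerate branch; rho must be empty
            rcases rho with _ | ⟨r0, rho'⟩
            · right
              have hm1pv : m1p = max a b := pvMax_eq h1 (maxab_pvMax a b)
              have hm2pv : m2p = min a b := by
                have := h2
                rw [hm1pv, erase_max_two] at this
                have hmem := this.1
                simpa using hmem
              have hm1nv : m1n = min a b := pvMin_eq h3 (minab_pvMin a b)
              have hm2nv : m2n = max a b := by
                have := hb
                rw [hm1nv, erase_min_two] at this
                have hmem := this.1
                simpa using hmem
              refine ⟨x, [], rfl, by omega, by omega, by simp, by omega,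
                List.mem_append.mpr (Or.inl (List.mem_of_mem_erase hb.1)), by omega⟩
            · exfalso
              have := m2n_le_m2p (a :: b :: r0 :: rho') (by simp) h1 h2 h3 hb
              omega
          · left
            rw [List.erase_append_left _ h3.1]
            refine ⟨List.mem_append.mpr (Or.inl hb.1), ?_⟩
            intro y hy
            rcases List.mem_append.mp hy with hm | hm
            · exact hb.2 y hm
            · simp at hm; omega
        · right
          refine ⟨c, rest ++ [x], by simp [hrho], hc1, hc2, ?_, hc4, List.mem_append.mpr (Or.inl hc5), by omega⟩
          intro y hy
          rcases List.mem_append.mp hy with hm | hm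
          · exact hc3 y hm
          · simp at hm; omega
  · have hxm2p : x ≤ m2p := not_lt.mp hx1
    by_cases hx3 : x < m2n
    · by_cases hx4 : x < m1n
      · -- new state (x, m1n, m2p, m1p)
        have hstep : solveStep (m1n, m2n, m2p, m1p) x = (x, m1n, m2p, m1p) := by
          simp [solveStep, hx1, hx3, hx4]
        rw [hstep]
        unfold LoopInv; dsimp only
        rw [hL]
        have hxnot : x ∉ (a :: b :: rho) := fun hm => absurd (h3.2 x hm) (not_le.mpr hx4)
        refine ⟨⟨List.mem_append.mpr (Or.inl h1.1), ?_⟩, ⟨?_, ?_⟩, ⟨List.mem_append.mpr (Or.inr (by simp)), ?_⟩, ?_⟩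
        · intro y hy
          rcases List.mem_append.mp hy with hm | hm
          · exact h1.2 y hm
          · simp at hm; omega
        · rw [List.erase_append_left _ h1.1]
          exact List.mem_append.mpr (Or.inl h2.1)
        · rw [List.erase_append_left _ h1.1]
          intro y hy
          rcases List.mem_append.mp hy with hm | hm
          · exact h2.2 y hm
          · simp at hm; omega
        · intro y hy
          rcases List.mem_append.mp hy with hm | hm
          · exact le_of_lt (lt_of_lt_of_le hx4 (h3.2 y hm))
          · simp at hm; omega
        · left
          rw [List.erase_append_right _ hxnot]
          simpa using h3
      · -- new state (m1n, x, m2p, m1p)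
        have hstep : solveStep (m1n, m2n, m2p, m1p) x = (m1n, x, m2p, m1p) := by
          simp [solveStep, hx1, hx3, hx4]
        rw [hstep]
        unfold LoopInv; dsimp only
        rw [hL]
        have hxm1n : m1n ≤ x := not_lt.mp hx4
        refine ⟨⟨List.mem_append.mpr (Or.inl h1.1), ?_⟩, ⟨?_, ?_⟩, ⟨List.mem_append.mpr (Or.inl h3.1), ?_⟩, ?_⟩
        · intro y hy
          rcases List.mem_append.mp hy with hm | hm
          · exact h1.2 y hm
          · simp at hm; omega
        · rw [List.erase_append_left _ h1.1]
          exact List.mem_append.mpr (Or.inl h2.1)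
        · rw [List.erase_append_left _ h1.1]
          intro y hy
          rcases List.mem_append.mp hy with hm | hm
          · exact h2.2 y hm
          · simp at hm; omega
        · intro y hy
          rcases List.mem_append.mp hy with hm | hm
          · exact h3.2 y hm
          · simp at hm; omega
        · rcases h4 with hb | ⟨c, rest, hrho, hc1, hc2, hc3, hc4, hc5, hc6⟩
          · left
            rw [List.erase_append_left _ h3.1]
            refine ⟨List.mem_append.mpr (Or.inr (by simp)), ?_⟩
            intro y hy
            rcases List.mem_append.mp hy with hm | hm
            · exact le_of_lt (lt_of_lt_of_le hx3 (hb.2 y hm))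
            · simp at hm; omega
          · by_cases hxc : x ≤ c
            · -- back to the exact second minimum
              left
              have hm1nv : m1n = min a b := by
                refine pvMin_eq h3 ⟨?_, ?_⟩
                · rcases le_total a b with hab | hab <;> simp [min_eq_left, min_eq_right, hab]
                · intro y hy
                  subst hrho
                  rcases List.mem_cons.mp hy with hm | hm
                  · rw [hm]; exact min_le_left a b
                  rcases List.mem_cons.mp hm with hm' | hm'
                  · rw [hm']; exact min_le_right a b
                  rcases List.mem_cons.mp hm' with hm'' | hm''
                  · have : min a b ≤ c := le_of_lt hc1
                    omega
                  · have := hc3 y hm''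
                    have : min a b ≤ c := le_of_lt hc1
                    omega
              rw [List.erase_append_left _ h3.1]
              subst hrho
              rw [hm1nv, erase_min_cons]
              refine ⟨List.mem_append.mpr (Or.inr (by simp)), ?_⟩
              intro y hy
              rcases List.mem_append.mp hy with hm | hm
              · rcases List.mem_cons.mp hm with hm' | hm'
                · rw [hm']; omega
                rcases List.mem_cons.mp hm' with hm'' | hm''
                · rw [hm'']; omega
                · have := hc3 y hm''; omega
              · simp at hm; omega
            · right
              refine ⟨c, rest ++ [x], by simp [hrho], hc1, hc2, ?_, by omega,
                List.mem_append.mpr (Or.inr (by simp)), hc6⟩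
              intro y hy
              rcases List.mem_append.mp hy with hm | hm
              · exact hc3 y hm
              · simp at hm; omega
    · -- no change
      have hstep : solveStep (m1n, m2n, m2p, m1p) x = (m1n, m2n, m2p, m1p) := by
        simp [solveStep, hx1, hx3]
      rw [hstep]
      unfold LoopInv; dsimp only
      rw [hL]
      have hxm2n : m2n ≤ x := not_lt.mp hx3
      refine ⟨⟨List.mem_append.mpr (Or.inl h1.1), ?_⟩, ⟨?_, ?_⟩, ⟨List.mem_append.mpr (Or.inl h3.1), ?_⟩, ?_⟩
      · intro y hy
        rcases List.mem_append.mp hy with hm | hm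
        · exact h1.2 y hm
        · simp at hm; omega
      · rw [List.erase_append_left _ h1.1]
        exact List.mem_append.mpr (Or.inl h2.1)
      · rw [List.erase_append_left _ h1.1]
        intro y hy
        rcases List.mem_append.mp hy with hm | hm
        · exact h2.2 y hm
        · simp at hm; omega
      · intro y hy
        rcases List.mem_append.mp hy with hm | hm
        · exact h3.2 y hm
        · simp at hm; omega
      · rcases h4 with hb | ⟨c, rest, hrho, hc1, hc2, hc3, hc4, hc5, hc6⟩
        · left
          rw [List.erase_append_left _ h3.1]
          refine ⟨List.mem_append.mpr (Or.inl hb.1), ?_⟩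
          intro y hy
          rcases List.mem_append.mp hy with hm | hm
          · exact hb.2 y hm
          · simp at hm; omega
        · right
          refine ⟨c, rest ++ [x], by simp [hrho], hc1, hc2, ?_, hc4, List.mem_append.mpr (Or.inl hc5), hc6⟩
          intro y hy
          rcases List.mem_append.mp hy with hm | hm
          · exact hc3 y hm
          · simp at hm; omega

theorem loopInv_fold (a b : Int) (l rho : List Int) (st : Int × Int × Int × Int)
    (h : LoopInv a b rho st) : LoopInv a b (rho ++ l) (l.foldl solveStep st) := by
  induction l generalizing rho st with
  | nil => simpa using h
  | cons x xs ih =>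
      have := ih (rho ++ [x]) (solveStep st x) (loopInv_step a b x rho st h)
      simpa [List.foldl] using this

theorem loopInv_main (a b : Int) (l : List Int) :
    LoopInv a b l (l.foldl solveStep (min a b, max a b, min a b, max a b)) := by
  simpa using loopInv_fold a b l [] _ (loopInv_init a b)

theorem solve_char (x0 x1 : Int) (rho : List Int) :
    solve (x0 :: x1 :: rho) =
      (let st := rho.foldl solveStep (min x0 x1, max x0 x1, min x0 x1, max x0 x1)
       if st.2.2.2 * st.2.2.1 ≥ st.1 * st.2.1 then (st.2.2.1, st.2.2.2) else (st.1, st.2.1)) := by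
  have hslice : PySem.List.slice (x0 :: x1 :: rho) (some 2) none = rho := by
    rw [PySem.List.slice_from _ (by omega : (0:Int) ≤ 2)]
    rfl
  have h0 : PySem.List.pyGet? (x0 :: x1 :: rho) 0 = some x0 := PySem.List.pyGet?_zero_cons x0 _
  have h1 : PySem.List.pyGet? (x0 :: x1 :: rho) 1 = some x1 := by
    have := PySem.List.pyGet?_ofNat (x0 :: x1 :: rho) 1 (by simp)
    simpa using this
  rw [solve, h0, h1, hslice]

theorem alt_char (nums : List Int) (q1 q2 u v : Int) (t' t : List Int)
    (hs1 : PySem.List.sorted nums (fun x => x) false = q1 :: q2 :: t')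
    (hs2 : PySem.List.sorted nums (fun x => x) false = t ++ [u, v]) :
    solve_alt nums = if u * v ≥ q1 * q2 then (u, v) else (q1, q2) := by
  have hm2 : PySem.List.pyGet? (PySem.List.sorted nums (fun x => x) false) (-2) = some u := by
    rw [PySem.List.pyGet?_neg_ofNat _ 2 (by omega) (by rw [hs2]; simp), hs2]
    have hl : (t ++ [u, v]).length - 2 = t.length := by simp
    rw [hl, List.getElem?_append_right (le_refl _)]
    simp
  have hm1 : PySem.List.pyGet? (PySem.List.sorted nums (fun x => x) false) (-1) = some v := by
    rw [hs2, show (t ++ [u, v]) = (t ++ [u]) ++ [v] by simp]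
    exact PySem.List.pyGet?_neg_one_append_singleton _ v
  have hg0 : PySem.List.pyGet? (PySem.List.sorted nums (fun x => x) false) 0 = some q1 := by
    rw [hs1]; exact PySem.List.pyGet?_zero_cons q1 _
  have hg1 : PySem.List.pyGet? (PySem.List.sorted nums (fun x => x) false) 1 = some q2 := by
    rw [hs1]
    have := PySem.List.pyGet?_ofNat (q1 :: q2 :: t') 1 (by simp)
    simpa using this
  rw [solve_alt, hm2, hm1, hg0, hg1]
  rfl

theorem sorted_facts (nums : List Int) (h2 : 2 ≤ nums.length) :
    ∃ q1 q2 u v t' t,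
      PySem.List.sorted nums (fun x => x) false = q1 :: q2 :: t' ∧
      PySem.List.sorted nums (fun x => x) false = t ++ [u, v] ∧
      PvMin nums q1 ∧ PvMin (nums.erase q1) q2 ∧ PvMax nums v ∧ PvMax (nums.erase v) u := by
  obtain ⟨s, hsdef⟩ : ∃ s, PySem.List.sorted nums (fun x => x) false = s := ⟨_, rfl⟩
  have hperm : s.Perm nums := hsdef ▸ PySem.List.sorted_perm nums _ false
  have hpair : s.Pairwise (· ≤ ·) := hsdef ▸ PySem.List.sorted_pairwise nums _
  have hlen : 2 ≤ s.length := by rw [hperm.length_eq]; exact h2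
  obtain ⟨q1, q2, t', hs1⟩ : ∃ q1 q2 t', s = q1 :: q2 :: t' := by
    rcases s with _ | ⟨y, _ | ⟨z, zs⟩⟩
    · simp at hlen
    · simp at hlen
    · exact ⟨y, z, zs, rfl⟩
  obtain ⟨u, v, t, hs2⟩ : ∃ u v t, s = t ++ [u, v] := by
    rcases hr : s.reverse with _ | ⟨y, _ | ⟨z, zs⟩⟩
    · have hnil : s = [] := by simpa using congrArg List.reverse hr
      rw [hnil] at hlen; simp at hlen
    · have hone : s = [y] := by simpa using congrArg List.reverse hr
      rw [hone] at hlen; simp at hlen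
    · refine ⟨z, y, zs.reverse, ?_⟩
      have hrev : s = (y :: z :: zs).reverse := by simpa using congrArg List.reverse hr
      rw [hrev]; simp
  rw [hsdef]
  refine ⟨q1, q2, u, v, t', t, hs1, hs2, ?_, ?_, ?_, ?_⟩
  · refine ⟨hperm.mem_iff.mp (by rw [hs1]; simp), ?_⟩
    intro y hy
    have hys : y ∈ s := hperm.mem_iff.mpr hy
    rw [hs1] at hys hpair
    rcases List.mem_cons.mp hys with rfl | hm
    · omega
    rw [List.pairwise_cons] at hpair
    exact hpair.1 y hm
  · have hE : (s.erase q1).Perm (nums.erase q1) := hperm.erase q1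
    have hsE : s.erase q1 = q2 :: t' := by rw [hs1]; exact List.erase_cons_head q1 (q2 :: t')
    refine pvMin_perm (hsE ▸ hE) ⟨by simp, ?_⟩
    intro y hy
    rw [hs1] at hpair
    rcases List.mem_cons.mp hy with rfl | hm
    · omega
    · rw [List.pairwise_cons] at hpair
      have := (List.pairwise_cons.mp hpair.2).1
      exact this y hm
  · refine ⟨hperm.mem_iff.mp (by rw [hs2]; simp), ?_⟩
    intro y hy
    have hys : y ∈ s := hperm.mem_iff.mpr hy
    rw [hs2] at hys hpair
    rw [List.pairwise_append] at hpair
    rcases List.mem_append.mp hys with hm | hm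
    · exact hpair.2.2 y hm v (by simp)
    · rcases List.mem_cons.mp hm with rfl | hm'
      · have := hpair.2.1; simp at this; omega
      · simp at hm'; omega
  · have hvmem : v ∈ s := by rw [hs2]; simp
    have hp1 : s.Perm (v :: s.erase v) := List.perm_cons_erase hvmem
    have hp2 : s.Perm (v :: (t ++ [u])) := by
      rw [hs2, show (t ++ [u, v]) = (t ++ [u]) ++ [v] by simp]
      exact List.perm_append_singleton v (t ++ [u])
    have hp3 : (s.erase v).Perm (t ++ [u]) := (hp1.symm.trans hp2).cons_inv
    have hE : (s.erase v).Perm (nums.erase v) := hperm.erase v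
    refine pvMax_perm (hp3.symm.trans hE) ⟨by simp, ?_⟩
    intro y hy
    rw [hs2, List.pairwise_append] at hpair
    rcases List.mem_append.mp hy with hm | hm
    · exact hpair.2.2 y hm u (by simp)
    · simp at hm; omega

theorem d_prod_eq (nums : List Int) (c u v : Int) (hc : c ∈ nums) (hcv : c < v)
    (hv : PvMax nums v) (hu : PvMax (nums.erase v) u) :
    (nums.erase (nums.foldr max c)).foldr max c * nums.foldr max c = u * v := by
  have hveq : nums.foldr max c = v := pvMax_eq (foldr_max_pvMax nums c hc) hv
  have hcE : c ∈ nums.erase v := (List.mem_erase_of_ne (by omega)).mpr hc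
  rw [hveq, pvMax_eq (foldr_max_pvMax (nums.erase v) c hcE) hu]

theorem shape_pvMin (x0 x1 c : Int) (rest : List Int)
    (hc1 : min x0 x1 < c) (hc3 : ∀ x ∈ rest, c < x) :
    PvMin (x0 :: x1 :: c :: rest) (min x0 x1) := by
  refine ⟨?_, ?_⟩
  · rcases le_total x0 x1 with h | h <;> simp [min_eq_left, min_eq_right, h]
  · intro y hy
    rcases List.mem_cons.mp hy with h | hm
    · omega
    rcases List.mem_cons.mp hm with h' | hm'
    · omega
    rcases List.mem_cons.mp hm' with h'' | hm''
    · omega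
    · have := hc3 y hm''; omega

theorem shape_pvMin2 (x0 x1 c : Int) (rest : List Int)
    (hc1 : min x0 x1 < c) (hc2 : c < max x0 x1) (hc3 : ∀ x ∈ rest, c < x) :
    PvMin ((x0 :: x1 :: c :: rest).erase (min x0 x1)) c := by
  rw [erase_min_cons]
  refine ⟨by simp, ?_⟩
  intro y hy
  rcases List.mem_cons.mp hy with h | hm
  · omega
  rcases List.mem_cons.mp hm with h' | hm'
  · omega
  · have := hc3 y hm'; omega

-- the exactness invariant: once the second minimum has been missed, it stays missed
theorem miss_fold (c : Int) : ∀ (l : List Int) (st : Int × Int × Int × Int),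
    (∀ x ∈ l, c < x) → st.1 < c → c < st.2.1 → c < st.2.2.2 →
    (l.foldl solveStep st).1 = st.1 ∧ c < (l.foldl solveStep st).2.1 ∧
      c < (l.foldl solveStep st).2.2.2 := by
  intro l
  induction l with
  | nil => intro st _ h1 h2 h3; exact ⟨rfl, h2, h3⟩
  | cons x xs ih =>
      intro st hl h1 h2 h3
      obtain ⟨m1n, m2n, m2p, m1p⟩ := st
      dsimp only at h1 h2 h3
      have hx : c < x := hl x (by simp)
      have hnext : ∀ y ∈ xs, c < y := fun y hy => hl y (by simp [hy])
      rw [List.foldl_cons]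
      by_cases hx1 : x > m2p
      · by_cases hx2 : x > m1p
        · have hstep : solveStep (m1n, m2n, m2p, m1p) x = (m1n, m2n, m1p, x) := by
            simp [solveStep, hx1, hx2]
          rw [hstep]; exact ih _ hnext h1 h2 hx
        · have hstep : solveStep (m1n, m2n, m2p, m1p) x = (m1n, m2n, x, m1p) := by
            simp [solveStep, hx1, hx2]
          rw [hstep]; exact ih _ hnext h1 h2 h3
      · by_cases hx3 : x < m2n
        · have hx4 : ¬ x < m1n := by omega
          have hstep : solveStep (m1n, m2n, m2p, m1p) x = (m1n, x, m2p, m1p) := by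
            simp [solveStep, hx1, hx3, hx4]
          rw [hstep]; exact ih _ hnext h1 hx h3
        · have hstep : solveStep (m1n, m2n, m2p, m1p) x = (m1n, m2n, m2p, m1p) := by
            simp [solveStep, hx1, hx3]
          rw [hstep]; exact ih _ hnext h1 h2 h3

-- ===== VERDICT (by name: the statement is the Claim_ definition above) =====
theorem solve_spec : Claim_unchanged_solve := by
  intro nums hdom hpre
  unfold Spec_solve
  intro hnd
  obtain ⟨x0, x1, rho, rfl⟩ : ∃ x0 x1 rho, nums = x0 :: x1 :: rho := by
    unfold Pre_solve at hpre
    rcases nums with _ | ⟨a, _ | ⟨b, l⟩⟩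
    · simp at hpre
    · simp at hpre
    · exact ⟨a, b, l, rfl⟩
  obtain ⟨q1, q2, u, v, t', t, hs1, hs2, hq1, hq2, hv, hu⟩ :=
    sorted_facts (x0 :: x1 :: rho) (by simp)
  rw [solve_char, alt_char _ q1 q2 u v t' t hs1 hs2]
  have hInv := loopInv_main x0 x1 rho
  set st := rho.foldl solveStep (min x0 x1, max x0 x1, min x0 x1, max x0 x1) with hst
  obtain ⟨H1, H2, H3, H4⟩ := hInv
  dsimp only
  have hm1p : st.2.2.2 = v := pvMax_eq H1 hv
  have hm1n : st.1 = q1 := pvMin_eq H3 hq1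
  have hm2p : st.2.2.1 = u := by
    refine pvMax_eq ?_ hu
    rw [← hm1p]
    exact H2
  rcases H4 with hb | ⟨c, rest, hrho, hc1, hc2, hc3, hc4, hc5, hc6⟩
  · have hm2n : st.2.1 = q2 := by
      refine pvMin_eq ?_ hq2
      rw [← hm1n]
      exact hb
    rw [hm1p, hm2p, hm1n, hm2n, mul_comm v u]
  · subst hrho
    have hcv : c < v := by
      have hM : max x0 x1 ∈ (x0 :: x1 :: c :: rest) := by
        rcases le_total x0 x1 with h | h <;> simp [max_eq_left, max_eq_right, h]
      have := hv.2 _ hM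
      omega
    have htop : ((x0 :: x1 :: c :: rest).erase ((x0 :: x1 :: c :: rest).foldr max c)).foldr max c *
        (x0 :: x1 :: c :: rest).foldr max c = u * v :=
      d_prod_eq _ c u v (by simp) hcv hv hu
    have hprod : min x0 x1 * c ≤ u * v := by
      by_contra hlt
      apply hnd
      unfold D_solve
      dsimp only
      refine ⟨hc1, (foldr_min_lt_iff rest c (max x0 x1)).mpr ⟨hc2, hc3⟩, ?_⟩
      omega
    have hq1m : q1 = min x0 x1 := pvMin_eq hq1 (shape_pvMin x0 x1 c rest hc1 hc3)
    have hq2c : q2 = c := by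
      refine pvMin_eq ?_ (shape_pvMin2 x0 x1 c rest hc1 hc2 hc3)
      rw [← hq1m]
      exact hq2
    have hBcond : u * v ≥ q1 * q2 := by
      rw [hq1m, hq2c]
      omega
    have hAcond : st.2.2.2 * st.2.2.1 ≥ st.1 * st.2.1 := by
      rw [hm1p, hm2p, hm1n, hq1m]
      rcases le_total (min x0 x1) 0 with hm0 | hm0
      · have h1 : min x0 x1 * st.2.1 ≤ min x0 x1 * c := by nlinarith
        nlinarith [hprod, h1]
      · have hmu : min x0 x1 ≤ u :=
          (shape_pvMin x0 x1 c rest hc1 hc3).2 u (List.mem_of_mem_erase hu.1)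
        have hm2nv : st.2.1 ≤ v := hv.2 _ hc5
        have h0 : 0 ≤ st.2.1 := by omega
        nlinarith
    rw [if_pos hAcond, if_pos hBcond, hm2p, hm1p]

theorem solve_changed : Claim_changed_solve := by
  unfold Claim_changed_solve; decide

theorem solve_tight : Claim_exact_solve := by
  intro nums hdom hpre hD
  obtain ⟨x0, x1, c, rest, rfl⟩ : ∃ x0 x1 c rest, nums = x0 :: x1 :: c :: rest := by
    rcases nums with _ | ⟨a, _ | ⟨b, _ | ⟨cc, l⟩⟩⟩
    · unfold D_solve at hD; exact hD.elim
    · unfold D_solve at hD; exact hD.elim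
    · unfold D_solve at hD; exact hD.elim
    · exact ⟨a, b, cc, l, rfl⟩
  unfold D_solve at hD
  dsimp only at hD
  obtain ⟨hd1, hd2', hd4'⟩ := hD
  obtain ⟨hd2, hd3⟩ := (foldr_min_lt_iff rest c (max x0 x1)).mp hd2'
  obtain ⟨q1, q2, u, v, t', t, hs1, hs2, hq1, hq2, hv, hu⟩ :=
    sorted_facts (x0 :: x1 :: c :: rest) (by simp)
  have hcv : c < v := by
    have hM : max x0 x1 ∈ (x0 :: x1 :: c :: rest) := by
      rcases le_total x0 x1 with h | h <;> simp [max_eq_left, max_eq_right, h]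
    have := hv.2 _ hM
    omega
  have htop : ((x0 :: x1 :: c :: rest).erase ((x0 :: x1 :: c :: rest).foldr max c)).foldr max c *
      (x0 :: x1 :: c :: rest).foldr max c = u * v :=
    d_prod_eq _ c u v (by simp) hcv hv hu
  rw [htop] at hd4'
  have hq1m : q1 = min x0 x1 := pvMin_eq hq1 (shape_pvMin x0 x1 c rest hd1 hd3)
  have hq2c : q2 = c := by
    refine pvMin_eq ?_ (shape_pvMin2 x0 x1 c rest hd1 hd2 hd3)
    rw [← hq1m]
    exact hq2
  have hBcond : ¬ (u * v ≥ q1 * q2) := by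
    rw [hq1m, hq2c]
    omega
  rw [solve_char, alt_char _ q1 q2 u v t' t hs1 hs2, if_neg hBcond]
  have hfirst : solveStep (min x0 x1, max x0 x1, min x0 x1, max x0 x1) c =
      (min x0 x1, max x0 x1, c, max x0 x1) := by
    have h2 : ¬ c > max x0 x1 := by omega
    simp [solveStep, hd1, h2]
  have hmiss := miss_fold c rest (min x0 x1, max x0 x1, c, max x0 x1) hd3
    (by dsimp only; omega) (by dsimp only; omega) (by dsimp only; omega)
  dsimp only
  rw [List.foldl_cons, hfirst]
  split_ifs with hcond
  · intro heq
    have h2 := congrArg Prod.snd heq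
    dsimp only at h2
    rw [hq2c] at h2
    omega
  · intro heq
    have h2 := congrArg Prod.snd heq
    dsimp only at h2
    rw [hq2c] at h2
    omega
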